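-- pv_equiv track=rewrite | github.com/YuXuan928/Python | 1.Python/作業/作業2/2.opt1.Diamond背景.py | diamond2
-- ===== SOURCE A (Python) =====
-- def diamond2(n):        #方法 有背景
--     s, t, str = '★', '☆', ''    #多重指派
--     x=1
--     for i in range(1,2*n):
--         for j in range(1,2*n):
--             k = int((2 * n - x) / 2 + 1)    #每列開始有實心星星的位置
--             str = str + s if (j >= k and j < (k + x)) else str + t  #菱形部份實心，其餘兩邊空白星
--         str+="\n"
--         x=x+2 if i<n else x-2
--     return str
-- ===== SOURCE B (Python) =====
-- def diamond2(n):
--     s, t = '\u2605', '\u2606'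
--     out = ''
--     for i in range(1, 2 * n):
--         w = 2 * (n - 1 - abs(i - n)) + 1
--         pad = ((2 * n - 1) - w) // 2
--         out += t * pad + s * w + t * pad + '\n'
--     return out
-- ===== Notes on version B (the rewrite author's own statement) =====
-- stated objective: faster
-- what changed: Replaces A's inner per-cell loop and maintained widening/narrowing width accumulator by a single loop over rows that derives each row's solid-star count and symmetric padding in closed form from the row index and builds the line with string repetition.
import Mathlib
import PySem

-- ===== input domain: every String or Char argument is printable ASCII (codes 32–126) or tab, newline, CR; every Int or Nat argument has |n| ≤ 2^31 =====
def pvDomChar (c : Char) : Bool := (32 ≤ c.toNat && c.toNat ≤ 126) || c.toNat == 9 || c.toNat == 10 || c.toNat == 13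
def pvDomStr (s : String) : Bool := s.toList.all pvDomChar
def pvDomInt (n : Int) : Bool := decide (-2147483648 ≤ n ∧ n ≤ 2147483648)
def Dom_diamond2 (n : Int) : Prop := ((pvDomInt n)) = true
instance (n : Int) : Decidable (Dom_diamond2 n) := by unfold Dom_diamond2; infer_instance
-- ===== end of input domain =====

-- B replaces A's per-cell inner loop and widening/narrowing accumulator by a direct
-- per-row star count w = 2*(n-1-|i-n|)+1 with symmetric padding (objective: faster, inner loop removed).

-- ===== PORT A =====
-- loop body of A's outer 'for i' loop (acc = (str, x))
-- k: Python's 'int((2*n - x)/2 + 1)' (float division then truncation); exact as floor division here,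
-- since in every executed inner iteration 2*n - x ≥ 1 > 0, where truncation = floor.
def pvStepA (n : Int) (acc : String × Int) (i : Int) : String × Int :=
  ((PySem.List.pyRange 1 (2*n) 1).foldl (fun str j =>
      let k := PySem.Int.floordiv (2*n - acc.2) 2 + 1
      if k ≤ j ∧ j < k + acc.2 then str ++ "★" else str ++ "☆") acc.1 ++ "\n",
   if i < n then acc.2 + 2 else acc.2 - 2)

def diamond2 (n : Int) : String :=
  ((PySem.List.pyRange 1 (2*n) 1).foldl (pvStepA n) ("", 1)).1

-- ===== PORT B =====
-- Python's 's * k' on strings ('' for k ≤ 0): exact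
def pvStrRep (s : String) (k : Int) : String := String.join (List.replicate k.toNat s)

-- loop body of B's 'for i' loop: the full line for row i
def pvLineB (n : Int) (i : Int) : String :=
  let w := 2*(n - 1 - |i - n|) + 1
  let pad := PySem.Int.floordiv ((2*n - 1) - w) 2
  pvStrRep "☆" pad ++ pvStrRep "★" w ++ pvStrRep "☆" pad ++ "\n"

def diamond2_alt (n : Int) : String :=
  (PySem.List.pyRange 1 (2*n) 1).foldl (fun out i => out ++ pvLineB n i) ""

-- ===== PRECONDITION & SPEC =====
def Spec_diamond2 (n : Int) (out : String) : Prop := out = diamond2_alt n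
instance (n : Int) (out : String) : Decidable (Spec_diamond2 n out) := by unfold Spec_diamond2; infer_instance

-- ===== CLAIM (what is proved, stated in full; the proofs are below) =====
def Claim_equal_diamond2 : Prop := ∀ (n : Int), Dom_diamond2 n → Spec_diamond2 n (diamond2 n)

-- ===== LEMMAS AND PROOFS =====


theorem pvJoin_cons (a : String) (l : List String) :
    String.join (a :: l) = a ++ String.join l := by
  induction l generalizing a with
  | nil => simp [String.join, String.append_empty]
  | cons b t ih =>
    show String.join ((a ++ b) :: t) = _
    rw [ih (a ++ b), ih b, String.append_assoc]

theorem pvJoin_append (l1 l2 : List String) :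
    String.join (l1 ++ l2) = String.join l1 ++ String.join l2 := by
  induction l1 with
  | nil => simp [String.join, String.empty_append]
  | cons a t ih => rw [List.cons_append, pvJoin_cons, pvJoin_cons, ih, String.append_assoc]

theorem pvFoldl_str_append (g : Int → String) (l : List Int) (a : String) :
    l.foldl (fun acc j => acc ++ g j) a = a ++ String.join (l.map g) := by
  induction l generalizing a with
  | nil => simp [String.join, String.append_empty]
  | cons x t ih => simp only [List.foldl_cons, List.map_cons, ih, pvJoin_cons,
      String.append_assoc]

theorem pvJoin_const (g : Int → String) (l : List Int) (u : String)
    (h : ∀ x ∈ l, g x = u) :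
    String.join (l.map g) = String.join (List.replicate l.length u) := by
  induction l with
  | nil => rfl
  | cons x t ih =>
    simp only [List.map_cons, List.length_cons, List.replicate_succ, pvJoin_cons,
      h x (by simp)]
    rw [ih (fun y hy => h y (by simp [hy]))]

theorem pv_row_eq (n x i : Int) (_hn : 1 ≤ n) (hi1 : 1 ≤ i) (hi2 : i < 2*n)
    (hx : x = 2*(n - |i - n|) - 1) (str : String) :
    (PySem.List.pyRange 1 (2*n) 1).foldl (fun str j =>
        let k := PySem.Int.floordiv (2*n - x) 2 + 1
        if k ≤ j ∧ j < k + x then str ++ "★" else str ++ "☆") str ++ "\n"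
    = str ++ pvLineB n i := by
  set A : Int := |i - n| with hA
  have hA0 : 0 ≤ A := abs_nonneg _
  have hAn : A ≤ n - 1 := by
    rcases abs_cases (i - n) with ⟨h1, _⟩ | ⟨h1, _⟩ <;> omega
  have hxval : x = 2*n - 2*A - 1 := by omega
  have hk : PySem.Int.floordiv (2*n - x) 2 + 1 = A + 1 := by
    have h2 : PySem.Int.floordiv (2*n - x) 2 = A := by
      rw [PySem.Int.floordiv_eq_iff_of_pos (by norm_num)]
      constructor <;> omega
    omega
  have hfun : (fun (str : String) (j : Int) =>
        let k := PySem.Int.floordiv (2*n - x) 2 + 1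
        if k ≤ j ∧ j < k + x then str ++ "★" else str ++ "☆")
      = fun str j => str ++ (if A + 1 ≤ j ∧ j < A + 1 + x then "★" else "☆") := by
    funext str j
    simp only [hk]
    split_ifs <;> rfl
  rw [hfun, pvFoldl_str_append]
  -- split the column range into padding / stars / padding
  have hsplit : PySem.List.pyRange 1 (2*n) 1
      = PySem.List.pyRange 1 (1 + A) 1 ++ PySem.List.pyRange (1 + A) (1 + A + x) 1
        ++ PySem.List.pyRange (1 + A + x) (2*n) 1 := by
    rw [List.append_assoc,
        ← PySem.List.pyRange_one_append (1 + A) (1 + A + x) (2*n) (by omega) (by omega),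
        ← PySem.List.pyRange_one_append 1 (1 + A) (2*n) (by omega) (by omega)]
  rw [hsplit]
  simp only [List.map_append]
  rw [pvJoin_append, pvJoin_append]
  rw [pvJoin_const _ _ "☆" (fun y hy => by
        rw [PySem.List.mem_pyRange_one] at hy
        rw [if_neg]; omega),
      pvJoin_const _ _ "★" (fun y hy => by
        rw [PySem.List.mem_pyRange_one] at hy
        rw [if_pos]; omega),
      pvJoin_const (l := PySem.List.pyRange (1 + A + x) (2*n) 1) _ "☆" (fun y hy => by
        rw [PySem.List.mem_pyRange_one] at hy
        rw [if_neg]; omega)]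
  simp only [PySem.List.length_pyRange_one]
  have e1 : (1 + A - 1).toNat = A.toNat := by omega
  have e2 : (1 + A + x - (1 + A)).toNat = x.toNat := by omega
  have e3 : (2*n - (1 + A + x)).toNat = A.toNat := by omega
  rw [e1, e2, e3]
  simp only [pvLineB, pvStrRep]
  have hw : 2*(n - 1 - |i - n|) + 1 = x := by rw [← hA]; omega
  rw [hw]
  have hpad : PySem.Int.floordiv (2*n - 1 - x) 2 = A := by
    rw [PySem.Int.floordiv_eq_iff_of_pos (by norm_num)]
    constructor <;> omega
  rw [hpad]
  simp [String.append_assoc]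

theorem pv_outer (n : Int) (hn : 1 ≤ n) (d : Nat) : ∀ (i0 x : Int) (str : String),
    1 ≤ i0 → 2*n = i0 + d → x = 2*(n - |i0 - n|) - 1 →
    ((PySem.List.pyRange i0 (2*n) 1).foldl (pvStepA n) (str, x)).1
      = (PySem.List.pyRange i0 (2*n) 1).foldl (fun out i => out ++ pvLineB n i) str := by
  induction d with
  | zero =>
    intro i0 x str _ h2 _
    rw [PySem.List.pyRange_one_eq_nil (by omega)]
    rfl
  | succ d ih =>
    intro i0 x str h1 h2 hx
    have hi0 : i0 < 2*n := by omega
    rw [PySem.List.pyRange_one_cons hi0]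
    simp only [List.foldl_cons]
    have hstep : pvStepA n (str, x) i0
        = (str ++ pvLineB n i0, if i0 < n then x + 2 else x - 2) := by
      simp only [pvStepA]
      rw [Prod.mk.injEq]
      exact ⟨pv_row_eq n x i0 hn h1 hi0 hx str, rfl⟩
    rw [hstep]
    apply ih (i0 + 1) _ _ (by omega) (by omega)
    rcases abs_cases (i0 - n) with ⟨ha, _⟩ | ⟨ha, _⟩ <;>
      rcases abs_cases (i0 + 1 - n) with ⟨hb, _⟩ | ⟨hb, _⟩ <;>
      rw [ha] at hx <;> rw [hb] <;> split_ifs <;> omega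

-- ===== VERDICT (by name: the statement is the Claim_ definition above) =====
theorem diamond2_spec : Claim_equal_diamond2 := by
  intro n _hd
  unfold Spec_diamond2
  by_cases hn : 1 ≤ n
  · have h1 : |1 - n| = n - 1 := by
      rcases abs_cases (1 - n) with ⟨h, _⟩ | ⟨h, _⟩ <;> omega
    unfold diamond2 diamond2_alt
    exact pv_outer n hn (2*n - 1).toNat 1 1 "" (by omega) (by omega) (by rw [h1]; ring)
  · have : 2*n ≤ 1 := by omega
    unfold diamond2 diamond2_alt
    rw [PySem.List.pyRange_one_eq_nil (by omega)]
    rfl
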